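-- pv_equiv track=rewrite | github.com/bipulvaibhav007/lead-sniper | scraper/enricher.py | sort_emails
-- ===== SOURCE A (Python) =====
-- GENERIC_PREFIXES = ['info', 'contact', 'admin', 'support', 'hello', 'office', 'sales', 'enquiries', 'team']
--
-- def sort_emails(email_list):
--     """Puts personal emails (john@) before generic emails (info@)."""
--     personal = []
--     generic = []
--     for email in email_list:
--         prefix = email.split('@')[0].lower()
--         if any(g in prefix for g in GENERIC_PREFIXES):
--             generic.append(email)
--         else:
--             personal.append(email)
--     return personal + generic
-- ===== SOURCE B (Python) =====
-- GENERIC_PREFIXES = ['info', 'contact', 'admin', 'support', 'hello', 'office', 'sales', 'enquiries', 'team']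
--
-- def sort_emails(email_list):
--     """Puts personal emails (john@) before generic emails (info@)."""
--     return sorted(email_list,
--                   key=lambda email: any(g in email.split('@')[0].lower() for g in GENERIC_PREFIXES))
-- ===== Notes on version B (the rewrite author's own statement) =====
-- stated objective: simpler
-- what changed: Replaced the two accumulator lists and explicit partition loop with a single stable sort keyed on the boolean 'is generic' predicate (False sorts before True), which yields personal-then-generic in original relative order.
import Mathlib
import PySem

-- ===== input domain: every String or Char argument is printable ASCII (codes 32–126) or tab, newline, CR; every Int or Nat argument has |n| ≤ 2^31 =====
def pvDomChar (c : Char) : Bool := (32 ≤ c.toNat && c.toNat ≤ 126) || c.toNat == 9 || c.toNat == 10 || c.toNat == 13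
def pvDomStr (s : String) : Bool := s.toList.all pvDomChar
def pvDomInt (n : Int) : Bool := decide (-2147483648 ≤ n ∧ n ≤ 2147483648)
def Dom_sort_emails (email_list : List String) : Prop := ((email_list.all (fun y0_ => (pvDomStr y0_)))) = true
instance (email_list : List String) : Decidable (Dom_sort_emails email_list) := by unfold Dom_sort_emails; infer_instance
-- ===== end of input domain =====

-- B replaces A's two-list partition loop with one stable sort on a boolean key (simpler; return value only).

-- ===== PORT A =====
def GENERIC_PREFIXES : List String :=
  ["info", "contact", "admin", "support", "hello", "office", "sales", "enquiries", "team"]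

-- shared predicate: any(g in email.split('@')[0].lower() for g in GENERIC_PREFIXES)
-- split('@') always returns a nonempty list in Python, so [0] is headD "" exactly.
def pvGeneric (email : String) : Bool :=
  GENERIC_PREFIXES.any (fun g =>
    PySem.Str.isIn g (PySem.Str.lower (((PySem.Str.split? email "@").getD []).headD "")))

def sort_emails (email_list : List String) : List String :=
  let pg := email_list.foldl
    (fun (acc : List String × List String) email =>
      if pvGeneric email then (acc.1, acc.2 ++ [email]) else (acc.1 ++ [email], acc.2))
    ([], [])
  pg.1 ++ pg.2

-- ===== PORT B =====
def sort_emails_alt (email_list : List String) : List String :=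
  PySem.List.sorted email_list (fun email => if pvGeneric email then (1 : Int) else 0) false

-- ===== PRECONDITION & SPEC =====
def Spec_sort_emails (email_list : List String) (out : List String) : Prop := out = sort_emails_alt email_list
instance (email_list : List String) (out : List String) : Decidable (Spec_sort_emails email_list out) := by unfold Spec_sort_emails; infer_instance

-- ===== CLAIM (what is proved, stated in full; the proofs are below) =====
def Claim_equal_sort_emails : Prop := ∀ (email_list : List String), Dom_sort_emails email_list → Spec_sort_emails email_list (sort_emails email_list)

-- ===== LEMMAS AND PROOFS =====

-- the boolean-key comparison used by B's sort, fired only when x is personal and y generic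
def pvBefore (x y : String) : Bool :=
  decide ((if pvGeneric x then (1 : Int) else 0) < (if pvGeneric y then (1 : Int) else 0))

theorem pvBefore_eq (x y : String) : pvBefore x y = (!pvGeneric x && pvGeneric y) := by
  unfold pvBefore
  cases hx : pvGeneric x <;> cases hy : pvGeneric y <;> simp

theorem insertBy_all_false (x : String) (ys : List String)
    (h : ∀ y ∈ ys, pvBefore x y = false) :
    PySem.List.insertBy pvBefore x ys = ys ++ [x] := by
  induction ys with
  | nil => rfl
  | cons y ys ih =>
    have hy : pvBefore x y = false := h y (by simp)
    simp [PySem.List.insertBy, hy, ih (fun z hz => h z (by simp [hz]))]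

theorem insertBy_split (x : String) (F G : List String)
    (hF : ∀ y ∈ F, pvBefore x y = false) :
    PySem.List.insertBy pvBefore x (F ++ G) = F ++ PySem.List.insertBy pvBefore x G := by
  induction F with
  | nil => rfl
  | cons f F ih =>
    have hf : pvBefore x f = false := hF f (by simp)
    simp [PySem.List.insertBy, hf, ih (fun z hz => hF z (by simp [hz]))]

-- B's foldl-of-insertBy maintains the partition invariant
theorem sorted01_invariant (ts : List String) : ∀ (F G : List String),
    (∀ y ∈ F, pvGeneric y = false) → (∀ y ∈ G, pvGeneric y = true) →
    ts.foldl (fun acc x => PySem.List.insertBy pvBefore x acc) (F ++ G)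
      = (F ++ ts.filter (fun x => !pvGeneric x)) ++ (G ++ ts.filter pvGeneric) := by
  induction ts with
  | nil => intro F G _ _; simp
  | cons t ts ih =>
    intro F G hF hG
    by_cases ht : pvGeneric t = true
    · have step : PySem.List.insertBy pvBefore t (F ++ G) = (F ++ G) ++ [t] := by
        apply insertBy_all_false
        intro y _
        simp [pvBefore_eq, ht]
      have := ih F (G ++ [t]) hF (by intro y hy; rcases List.mem_append.mp hy with h | h
                                     · exact hG y h
                                     · simp at h; simpa [h] using ht)
      simp only [List.foldl_cons, step, List.append_assoc] at this ⊢
      rw [this]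
      simp [List.filter_cons, ht]
    · have ht' : pvGeneric t = false := by simpa using ht
      have step : PySem.List.insertBy pvBefore t (F ++ G) = (F ++ [t]) ++ G := by
        rw [insertBy_split t F G (by intro y hy; simp [pvBefore_eq, hF y hy])]
        cases G with
        | nil => simp [PySem.List.insertBy]
        | cons g G =>
          have hg : pvBefore t g = true := by
            simp [pvBefore_eq, ht', hG g (by simp)]
          simp [PySem.List.insertBy, hg]
      have := ih (F ++ [t]) G
        (by intro y hy; rcases List.mem_append.mp hy with h | h
            · exact hF y h
            · simp at h; simpa [h] using ht')
        hG
      simp only [List.foldl_cons, step] at this ⊢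
      rw [this]
      simp [List.filter_cons, ht']

-- A's foldl partition invariant
theorem partA_invariant (ts : List String) : ∀ (P G : List String),
    ts.foldl (fun (acc : List String × List String) email =>
        if pvGeneric email then (acc.1, acc.2 ++ [email]) else (acc.1 ++ [email], acc.2))
      (P, G)
      = (P ++ ts.filter (fun x => !pvGeneric x), G ++ ts.filter pvGeneric) := by
  induction ts with
  | nil => intro P G; simp
  | cons t ts ih =>
    intro P G
    by_cases ht : pvGeneric t = true
    · simp [List.foldl_cons, ht, ih]
    · have ht' : pvGeneric t = false := by simpa using ht
      simp [List.foldl_cons, ht', ih]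

-- ===== VERDICT (by name: the statement is the Claim_ definition above) =====
theorem sort_emails_spec : Claim_equal_sort_emails := by
  intro email_list _
  unfold Spec_sort_emails sort_emails sort_emails_alt
  have hb : PySem.List.sorted email_list
      (fun email => if pvGeneric email then (1 : Int) else 0) false
      = email_list.foldl (fun acc x => PySem.List.insertBy pvBefore x acc) [] := by
    rw [PySem.List.sorted_eq_foldl_insertBy]
    rfl
  rw [hb]
  have h2 := sorted01_invariant email_list [] [] (by simp) (by simp)
  simp only [List.nil_append, List.append_nil] at h2 ⊢
  rw [h2, partA_invariant]
  simp
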